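-- pv_equiv track=rewrite | github.com/Dam0305/Algorithm | 이코테/큰 수의 법칙.py | solution
-- ===== SOURCE A (Python) =====
-- def solution(N, M, K):
--     total = 0  # 결과값 저장할 변수
--     cnt = 0  # 반복 수 체크하기 위한 변수
--
--     # 역순으로 정렬
--     N.sort(reverse=True)
--
--     for i in range(M):
--         # K번 반복을 했으면
--         if cnt == K:
--             # 두 번째로 작은 수를 한 번만 더하고 다시 count하기 위해 cnt값을 0으로 초기화
--             total += N[1]
--             cnt = 0
--
--         # 아직 K번 반복하지 않았으면
--         elif cnt != K:
--             # 가장 큰 수를 더하고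
--             total += N[0]
--             # cnt 값을 1 증가
--             cnt += 1
--     # 최종값 return
--     return total
-- ===== SOURCE B (Python) =====
-- def solution(N, M, K):
--     # Closed form instead of the M-step loop; sorts N in place like the original.
--     N.sort(reverse=True)
--     if M <= 0:
--         return 0
--     if K < 0 or M <= K:
--         return M * N[0]
--     if K == 0:
--         return M * N[1]
--     q, r = divmod(M, K + 1)
--     return q * (K * N[0] + N[1]) + r * N[0]
-- ===== Notes on version B (the rewrite author's own statement) =====
-- stated objective: faster
-- what changed: Replaces the M-iteration counting loop by a closed-form amount: q=M//(K+1) full cycles of K largest plus one second-largest, plus M%(K+1) extra largest, with direct formulas for the K<0, K==0 and M<=K cases.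
import Mathlib
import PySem

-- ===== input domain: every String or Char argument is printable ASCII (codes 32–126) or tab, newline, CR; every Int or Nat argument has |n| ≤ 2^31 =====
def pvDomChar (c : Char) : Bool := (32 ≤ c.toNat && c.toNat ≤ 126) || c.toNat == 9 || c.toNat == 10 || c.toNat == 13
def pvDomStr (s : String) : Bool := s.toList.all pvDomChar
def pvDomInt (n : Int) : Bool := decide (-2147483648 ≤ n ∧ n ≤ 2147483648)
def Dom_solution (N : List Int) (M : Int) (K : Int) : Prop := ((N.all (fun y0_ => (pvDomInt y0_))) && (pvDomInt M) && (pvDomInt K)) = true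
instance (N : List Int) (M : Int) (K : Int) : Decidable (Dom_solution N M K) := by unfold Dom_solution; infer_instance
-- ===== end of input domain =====

-- B replaces A's M-step counting loop by a closed form (full cycles of K+1 picks plus a remainder);
-- both A and B sort N in place — the equivalence proved here is about the return value.

-- ===== PORT A =====
-- the loop body of A: state (total, cnt); a = N[0], b = N[1] after the reverse sort
def pvStep (K a b : Int) (s : Int × Int) : Int × Int :=
  if s.2 == K then (s.1 + b, 0) else (s.1 + a, s.2 + 1)

def solution (N : List Int) (M : Int) (K : Int) : Int :=
  let Ns := PySem.List.sorted N (fun x => x) true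
  -- N[0] / N[1] as total pyGetD: exact under Pre_solution (A raises IndexError outside it)
  let a := PySem.List.pyGetD Ns 0 0
  let b := PySem.List.pyGetD Ns 1 0
  ((PySem.List.pyRange 0 M 1).foldl (fun s _ => pvStep K a b s) (0, 0)).1

-- ===== PORT B =====
def solution_alt (N : List Int) (M : Int) (K : Int) : Int :=
  let Ns := PySem.List.sorted N (fun x => x) true
  let a := PySem.List.pyGetD Ns 0 0
  let b := PySem.List.pyGetD Ns 1 0
  if M ≤ 0 then 0
  else if K < 0 ∨ M ≤ K then M * a
  else if K == 0 then M * b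
  else
    let q := PySem.Int.floordiv M (K + 1)
    let r := PySem.Int.mod M (K + 1)
    q * (K * a + b) + r * a

-- ===== PRECONDITION & SPEC =====
-- Pre_ excludes exactly the inputs on which A raises IndexError (N too short for the N[0]/N[1] it reads).
def Pre_solution (N : List Int) (M : Int) (K : Int) : Prop :=
  M ≤ 0 ∨ 2 ≤ N.length ∨ (N ≠ [] ∧ (K < 0 ∨ (0 < K ∧ M ≤ K)))
instance (N : List Int) (M : Int) (K : Int) : Decidable (Pre_solution N M K) := by unfold Pre_solution; infer_instance
def pvWitness_solution : List Int × Int × Int := ([5, 3, 2], 7, 2)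
def Spec_solution (N : List Int) (M : Int) (K : Int) (out : Int) : Prop := out = solution_alt N M K
instance (N : List Int) (M : Int) (K : Int) (out : Int) : Decidable (Spec_solution N M K out) := by unfold Spec_solution; infer_instance

-- ===== CLAIM (what is proved, stated in full; the proofs are below) =====
def Claim_equal_solution : Prop := ∀ (N : List Int) (M : Int) (K : Int), Dom_solution N M K → Pre_solution N M K → Spec_solution N M K (solution N M K)

-- ===== LEMMAS AND PROOFS =====

theorem pv_foldl_const {α β : Type} (l : List α) (g : β → β) (s : β) :
    l.foldl (fun s _ => g s) s = g^[l.length] s := by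
  induction l generalizing s with
  | nil => rfl
  | cons x t ih => simp [List.foldl, ih, Function.iterate_succ_apply]

theorem pv_iter_negK (K a b : Int) (hK : K < 0) (n : Nat) (t c : Int) (hc : 0 ≤ c) :
    (pvStep K a b)^[n] (t, c) = (t + n * a, c + n) := by
  induction n with
  | zero => simp
  | succ m ih =>
    rw [Function.iterate_succ_apply', ih, pvStep]
    have hne : (c + (m : Int) == K) = false := by simp; omega
    simp only [hne, Bool.false_eq_true, if_false, Prod.mk.injEq]
    constructor <;> push_cast <;> ring

theorem pv_iter_rem (K a b : Int) (r : Nat) (hr : (r : Int) ≤ K) (t : Int) :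
    (pvStep K a b)^[r] (t, 0) = (t + r * a, (r : Int)) := by
  induction r generalizing t with
  | zero => simp
  | succ m ih =>
    rw [Function.iterate_succ_apply', ih (by push_cast at hr ⊢; omega), pvStep]
    have hne : ((m : Int) == K) = false := by simp; push_cast at hr; omega
    simp only [hne, Bool.false_eq_true, if_false, Prod.mk.injEq]
    constructor <;> push_cast <;> ring

theorem pv_iter_cycle (K a b : Int) (hK : 0 ≤ K) (t : Int) :
    (pvStep K a b)^[K.toNat + 1] (t, 0) = (t + K * a + b, 0) := by
  rw [Function.iterate_succ_apply', pv_iter_rem K a b K.toNat (by omega) t, pvStep]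
  simp [Int.toNat_of_nonneg hK]

theorem pv_iter_cycles (K a b : Int) (hK : 0 ≤ K) (q : Nat) (t : Int) :
    (pvStep K a b)^[q * (K.toNat + 1)] (t, 0) = (t + q * (K * a + b), 0) := by
  induction q generalizing t with
  | zero => simp
  | succ m ih =>
    have hsplit : (m + 1) * (K.toNat + 1) = m * (K.toNat + 1) + (K.toNat + 1) := by ring
    rw [hsplit, Function.iterate_add_apply, pv_iter_cycle K a b hK t, ih]
    simp only [Prod.mk.injEq]
    constructor <;> push_cast <;> ring

theorem pv_iter_full (K a b : Int) (hK : 0 ≤ K) (q r : Nat) (hr : (r : Int) ≤ K) :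
    (pvStep K a b)^[r + q * (K.toNat + 1)] ((0 : Int), (0 : Int))
      = ((q : Int) * (K * a + b) + (r : Int) * a, (r : Int)) := by
  rw [Function.iterate_add_apply, pv_iter_cycles K a b hK q 0, pv_iter_rem K a b r hr]
  simp only [Prod.mk.injEq]
  constructor <;> push_cast <;> ring

theorem pv_sol_iter (N : List Int) (M K : Int) :
    solution N M K =
      ((pvStep K (PySem.List.pyGetD (PySem.List.sorted N (fun x => x) true) 0 0)
               (PySem.List.pyGetD (PySem.List.sorted N (fun x => x) true) 1 0))^[M.toNat]
        ((0 : Int), (0 : Int))).1 := by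
  simp only [solution, pv_foldl_const, PySem.List.length_pyRange_one, Int.sub_zero]

-- ===== VERDICT (by name: the statement is the Claim_ definition above) =====
theorem solution_spec : Claim_equal_solution := by
  intro N M K _ _
  unfold Spec_solution solution_alt
  set Ns := PySem.List.sorted N (fun x => x) true with hNs
  set a := PySem.List.pyGetD Ns 0 0 with ha
  set b := PySem.List.pyGetD Ns 1 0 with hb
  rw [pv_sol_iter]
  rw [← hNs, ← ha, ← hb]
  by_cases hM : M ≤ 0
  · have h0 : M.toNat = 0 := by omega
    simp [hM, h0]
  · replace hM : 0 < M := by omega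
    have hMn : ((M.toNat : Nat) : Int) = M := Int.toNat_of_nonneg (by omega)
    by_cases hKneg : K < 0
    · rw [pv_iter_negK K a b hKneg M.toNat 0 0 le_rfl]
      simp only [if_neg (by omega : ¬ M ≤ 0), if_pos (Or.inl hKneg)]
      rw [hMn]; ring
    · replace hKneg : 0 ≤ K := by omega
      by_cases hMK : M ≤ K
      · rw [pv_iter_rem K a b M.toNat (by omega) 0]
        simp only [if_neg (by omega : ¬ M ≤ 0), if_pos (Or.inr hMK)]
        rw [hMn]; ring
      · replace hMK : K < M := by omega
        by_cases hK0 : K = 0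
        · subst hK0
          have hn : M.toNat = 0 + M.toNat * (Int.toNat 0 + 1) := by simp
          rw [hn, pv_iter_full 0 a b le_rfl M.toNat 0 (by simp)]
          have hc : ((0 : Int) == 0) = true := by decide
          simp only [if_neg (by omega : ¬ M ≤ 0),
            if_neg (by omega : ¬ ((0:Int) < 0 ∨ M ≤ 0)), hc, if_pos]
          rw [hMn]; ring
        · have hKpos : 0 < K := by omega
          set q := M / (K + 1) with hqdef
          set r := M % (K + 1) with hrdef
          have hq0 : 0 ≤ q := Int.ediv_nonneg (by omega) (by omega)
          have hr0 : 0 ≤ r := Int.emod_nonneg M (by omega)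
          have hrlt : r < K + 1 := Int.emod_lt_of_pos M (by omega)
          have hsum : (K + 1) * q + r = M := Int.mul_ediv_add_emod M (K + 1)
          have hcast : ((r.toNat + q.toNat * (K.toNat + 1) : Nat) : Int) = M := by
            push_cast
            rw [Int.toNat_of_nonneg hq0, Int.toNat_of_nonneg hr0, Int.toNat_of_nonneg hKneg]
            linarith [hsum]
          have hn : M.toNat = r.toNat + q.toNat * (K.toNat + 1) := by omega
          rw [hn, pv_iter_full K a b hKneg q.toNat r.toNat
            (by rw [Int.toNat_of_nonneg hr0]; omega)]
          have hc : (K == 0) = false := by simp [hK0]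
          simp only [if_neg (by omega : ¬ M ≤ 0),
            if_neg (by omega : ¬ (K < 0 ∨ M ≤ K)), hc, Bool.false_eq_true, if_false,
            PySem.Int.floordiv_eq_ediv_of_pos (by omega : (0:Int) < K + 1),
            PySem.Int.mod_eq_emod_of_pos (by omega : (0:Int) < K + 1)]
          rw [← hqdef, ← hrdef, Int.toNat_of_nonneg hq0, Int.toNat_of_nonneg hr0]
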